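-- pv_equiv track=rewrite | github.com/antoine78910/visifoot-2.0 | backend/app/api/teams.py | _dedupe_teams_prefer_country
-- ===== SOURCE A (Python) =====
-- def _dedupe_teams_prefer_country(teams: list) -> list:
--     """Supprime les doublons (même nom normalisé), garde une seule entrée par équipe en préférant celle avec country."""
--     if not teams:
--         return teams
--     seen: dict[str, dict] = {}
--     for t in teams:
--         name = (t.get("name") or "").strip()
--         key = name.lower()
--         if not key:
--             continue
--         existing = seen.get(key)
--         has_country = bool((t.get("country") or "").strip())
--         if existing is None:
--             seen[key] = t
--         elif has_country and not (existing.get("country") or "").strip():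
--             seen[key] = t
--     return list(seen.values())
-- ===== SOURCE B (Python) =====
-- def _dedupe_teams_prefer_country(teams: list) -> list:
--     """Group teams by normalized name, then pick per group the first with a country (else the first)."""
--     if not teams:
--         return teams
--     groups: dict[str, list] = {}
--     for t in teams:
--         key = (t.get("name") or "").strip().lower()
--         if key:
--             groups.setdefault(key, []).append(t)
--     return [
--         next((t for t in g if (t.get("country") or "").strip()), g[0])
--         for g in groups.values()
--     ]
-- ===== Notes on version B (the rewrite author's own statement) =====
-- stated objective: alternative
-- what changed: Instead of maintaining a one-winner-per-key dict with an in-place replacement rule, B first groups teams by normalized name into an order-preserving dict of lists, then selects per group the first team with a non-empty country, falling back to the group's first team.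
import Mathlib
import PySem

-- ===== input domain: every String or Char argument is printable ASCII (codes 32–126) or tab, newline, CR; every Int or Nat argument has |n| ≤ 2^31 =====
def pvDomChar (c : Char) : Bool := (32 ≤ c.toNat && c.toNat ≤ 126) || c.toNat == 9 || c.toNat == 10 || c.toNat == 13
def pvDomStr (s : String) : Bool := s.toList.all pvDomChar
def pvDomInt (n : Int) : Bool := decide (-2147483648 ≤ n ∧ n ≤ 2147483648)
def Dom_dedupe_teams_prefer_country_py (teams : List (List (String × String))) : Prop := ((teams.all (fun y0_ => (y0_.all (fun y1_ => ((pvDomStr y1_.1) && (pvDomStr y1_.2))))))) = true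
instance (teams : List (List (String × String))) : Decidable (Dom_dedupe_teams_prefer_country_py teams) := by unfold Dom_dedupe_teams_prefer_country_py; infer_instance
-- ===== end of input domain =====

-- B differs from A by decomposition: A keeps one winner per key with an in-place replacement rule;
-- B groups teams by normalized name first and then selects per group (first with country, else first).

-- shared helpers: (t.get(k) or "") — for a str-valued dict, `x or ""` is "" on None and on "", i.e. getD ""
def pvGetS (t : List (String × String)) (k : String) : String :=
  ((PySem.Dict.mk t).get? k).getD ""

-- bool((t.get("country") or "").strip())
def pvHasC (t : List (String × String)) : Bool :=
  !(PySem.Str.strip (pvGetS t "country") == "")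

-- ===== PORT A =====
def dedupe_teams_prefer_country_py (teams : List (List (String × String))) : List (List (String × String)) :=
  if teams.isEmpty then teams
  else
    let seen := teams.foldl (fun seen t =>
      let name := PySem.Str.strip (pvGetS t "name")
      let key := PySem.Str.lower name
      if key = "" then seen
      else
        let existing := PySem.Dict.get? seen key
        let has_country := pvHasC t
        match existing with
        | none => seen.insert key t
        | some ex => if has_country && !(pvHasC ex) then seen.insert key t else seen)
      PySem.Dict.empty
    PySem.Dict.values seen

-- ===== PORT B =====
-- key = (t.get("name") or "").strip().lower()
def pvKeyB (t : List (String × String)) : String :=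
  PySem.Str.lower (PySem.Str.strip (pvGetS t "name"))

-- next((t for t in g if (t.get("country") or "").strip()), g[0]); groups are never empty so headD is never hit
def pvPick (g : List (List (String × String))) : List (String × String) :=
  match g.find? pvHasC with
  | some t => t
  | none => g.headD []

def dedupe_teams_prefer_country_py_alt (teams : List (List (String × String))) : List (List (String × String)) :=
  if teams.isEmpty then teams
  else
    let groups := teams.foldl (fun gs t =>
      let key := pvKeyB t
      if key = "" then gs
      else gs.insert key (gs.getD key [] ++ [t]))   -- groups.setdefault(key, []).append(t)
      PySem.Dict.empty
    (PySem.Dict.values groups).map pvPick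

-- ===== PRECONDITION & SPEC =====
def Spec_dedupe_teams_prefer_country_py (teams : List (List (String × String))) (out : List (List (String × String))) : Prop := out = dedupe_teams_prefer_country_py_alt teams
instance (teams : List (List (String × String))) (out : List (List (String × String))) : Decidable (Spec_dedupe_teams_prefer_country_py teams out) := by unfold Spec_dedupe_teams_prefer_country_py; infer_instance

-- ===== CLAIM (what is proved, stated in full; the proofs are below) =====
def Claim_equal_dedupe_teams_prefer_country_py : Prop := ∀ (teams : List (List (String × String))), Dom_dedupe_teams_prefer_country_py teams → Spec_dedupe_teams_prefer_country_py teams (dedupe_teams_prefer_country_py teams)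

-- ===== LEMMAS AND PROOFS =====

-- picking from a one-element group gives that element
theorem pvPick_singleton (t : List (String × String)) : pvPick [t] = t := by
  simp only [pvPick, List.find?]
  cases h : pvHasC t <;> simp

-- appending one team to a nonempty group updates the pick exactly by A's replacement rule
theorem pvPick_append_singleton (g : List (List (String × String))) (t : List (String × String))
    (hg : g ≠ []) :
    pvPick (g ++ [t]) = if pvHasC t && !(pvHasC (pvPick g)) then t else pvPick g := by
  obtain ⟨a, l, rfl⟩ := List.exists_cons_of_ne_nil hg
  unfold pvPick
  rw [List.find?_append]
  cases hfind : (a :: l).find? pvHasC with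
  | some u =>
    have hu : pvHasC u = true := List.find?_some hfind
    simp [hu]
  | none =>
    have hhead : pvHasC a = false := by
      simpa using List.find?_eq_none.mp hfind a (by simp)
    cases ht : pvHasC t with
    | false => simp [List.find?, ht, hhead]
    | true => simp [List.find?, ht, hhead]

-- the loop invariant: A's dict is B's group dict mapped through pvPick, pointwise
theorem loop_inv (teams : List (List (String × String))) :
    ∀ (dA : PySem.Dict String (List (String × String)))
      (dB : PySem.Dict String (List (List (String × String)))),
      dA.keys = dB.keys → dB.keys.Nodup →
      (∀ k, dA.get? k = (dB.get? k).map pvPick) →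
      (∀ k g, dB.get? k = some g → g ≠ []) →
      (let dA' := teams.foldl (fun seen t =>
          let name := PySem.Str.strip (pvGetS t "name")
          let key := PySem.Str.lower name
          if key = "" then seen
          else
            let existing := PySem.Dict.get? seen key
            let has_country := pvHasC t
            match existing with
            | none => seen.insert key t
            | some ex => if has_country && !(pvHasC ex) then seen.insert key t else seen) dA
       let dB' := teams.foldl (fun gs t =>
          let key := pvKeyB t
          if key = "" then gs
          else gs.insert key (gs.getD key [] ++ [t])) dB
       dA'.keys = dB'.keys ∧ dB'.keys.Nodup ∧
       (∀ k, dA'.get? k = (dB'.get? k).map pvPick) ∧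
       (∀ k g, dB'.get? k = some g → g ≠ [])) := by
  induction teams with
  | nil => intro dA dB h1 h2 h3 h4; exact ⟨h1, h2, h3, h4⟩
  | cons t rest ih =>
    intro dA dB hkeys hnd hrel hne
    simp only [List.foldl_cons]
    by_cases hk : PySem.Str.lower (PySem.Str.strip (pvGetS t "name")) = ""
    · simp only [pvKeyB, hk, if_true]
      exact ih dA dB hkeys hnd hrel hne
    · simp only [pvKeyB, if_neg hk]
      set key := PySem.Str.lower (PySem.Str.strip (pvGetS t "name")) with hkeydef
      cases hgB : dB.get? key with
      | none =>
        have hgA : dA.get? key = none := by rw [hrel key, hgB]; rfl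
        have hcB : dB.contains key = false := by
          rw [PySem.Dict.contains_eq_isSome_get?, hgB]; rfl
        have hcA : dA.contains key = false := by
          rw [PySem.Dict.contains_eq_isSome_get?, hgA]; rfl
        simp only [hgA, PySem.Dict.getD_of_not_contains dB [] hcB, List.nil_append]
        apply ih
        · rw [PySem.Dict.keys_insert_of_not_contains dA t hcA,
              PySem.Dict.keys_insert_of_not_contains dB [t] hcB, hkeys]
        · rw [PySem.Dict.keys_insert_of_not_contains dB [t] hcB]
          have hkn : key ∉ dB.keys := by
            intro hmem
            have := (PySem.Dict.contains_iff_mem_keys dB key).mpr hmem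
            rw [hcB] at this; exact absurd this (by simp)
          rw [List.nodup_append]
          refine ⟨hnd, List.nodup_singleton _, ?_⟩
          intro a ha b hb
          have hb' : b = key := by simpa using hb
          rw [hb']
          intro hEq
          rw [hEq] at ha
          exact hkn ha
        · intro k
          rw [PySem.Dict.get?_insert, PySem.Dict.get?_insert]
          by_cases hkk : k = key
          · simp [hkk, pvPick_singleton]
          · simp [hkk, hrel k]
        · intro k g
          rw [PySem.Dict.get?_insert]
          by_cases hkk : k = key
          · simp only [hkk]
            intro h; cases h; simp
          · simp only [if_neg hkk]; exact hne k g
      | some g =>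
        have hgne : g ≠ [] := hne key g hgB
        have hgA : dA.get? key = some (pvPick g) := by rw [hrel key, hgB]; rfl
        have hcB : dB.contains key = true := by
          rw [PySem.Dict.contains_eq_isSome_get?, hgB]; rfl
        have hcA : dA.contains key = true := by
          rw [PySem.Dict.contains_eq_isSome_get?, hgA]; rfl
        have hgD : dB.getD key [] = g := PySem.Dict.getD_of_get?_eq_some dB [] hgB
        simp only [hgA, hgD]
        apply ih
        · cases hc : pvHasC t && !(pvHasC (pvPick g)) with
          | true =>
            simp only [if_true,
              PySem.Dict.keys_insert_of_contains dA t hcA,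
              PySem.Dict.keys_insert_of_contains dB (g ++ [t]) hcB, hkeys]
          | false =>
            simp only [Bool.false_eq_true, if_false,
              PySem.Dict.keys_insert_of_contains dB (g ++ [t]) hcB, hkeys]
        · rw [PySem.Dict.keys_insert_of_contains dB (g ++ [t]) hcB]; exact hnd
        · intro k
          cases hc : pvHasC t && !(pvHasC (pvPick g)) with
          | true =>
            simp only [if_true]
            rw [PySem.Dict.get?_insert, PySem.Dict.get?_insert]
            by_cases hkk : k = key
            · simp [hkk, pvPick_append_singleton g t hgne, hc]
            · simp [hkk, hrel k]
          | false =>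
            simp only [Bool.false_eq_true, if_false]
            rw [PySem.Dict.get?_insert]
            by_cases hkk : k = key
            · simp [hkk, hgA, pvPick_append_singleton g t hgne, hc]
            · simp [hkk, hrel k]
        · intro k g' hg'
          rw [PySem.Dict.get?_insert] at hg'
          by_cases hkk : k = key
          · rw [if_pos hkk] at hg'
            cases hg'; simp
          · rw [if_neg hkk] at hg'
            exact hne k g' hg'

-- ===== VERDICT (by name: the statement is the Claim_ definition above) =====
theorem dedupe_teams_prefer_country_py_spec : Claim_equal_dedupe_teams_prefer_country_py := by
  intro teams _
  unfold Spec_dedupe_teams_prefer_country_py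
  unfold dedupe_teams_prefer_country_py dedupe_teams_prefer_country_py_alt
  by_cases hE : teams.isEmpty
  · simp [hE]
  · simp only [hE, if_false, Bool.false_eq_true]
    have h := loop_inv teams PySem.Dict.empty PySem.Dict.empty
      (by simp [PySem.Dict.keys_empty]) (by simp [PySem.Dict.keys_empty])
      (by intro k; simp [PySem.Dict.get?_empty]) (by intro k g h; simp [PySem.Dict.get?_empty] at h)
    obtain ⟨hkeys, hnd, hrel, hne⟩ := h
    set dA' := teams.foldl _ PySem.Dict.empty with hAdef
    set dB' := teams.foldl _ PySem.Dict.empty with hBdef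
    have hndA : dA'.keys.Nodup := hkeys ▸ hnd
    rw [PySem.Dict.values_eq_map_keys dA' hndA [],
        PySem.Dict.values_eq_map_keys dB' hnd [],
        List.map_map, hkeys]
    apply List.map_congr_left
    intro k hkmem
    have hsome : dB'.get? k ≠ none := by
      intro hnone
      exact ((PySem.Dict.get?_eq_none_iff_not_mem_keys dB' k).mp hnone) hkmem
    cases hg : dB'.get? k with
    | none => exact absurd hg hsome
    | some g =>
      have hA : dA'.get? k = some (pvPick g) := by rw [hrel k, hg]; rfl
      rw [PySem.Dict.getD_of_get?_eq_some dA' [] hA,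
          Function.comp_apply,
          PySem.Dict.getD_of_get?_eq_some dB' [] hg]
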